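-- pv_equiv track=rewrite | github.com/jimmy-academia/dev-knot | schemes/l2m.py | get_text_chunks
-- ===== SOURCE A (Python) =====
-- def get_text_chunks(text, num_chunks):
--     """Splits text into a specified number of roughly equal chunks."""
--     if not text or num_chunks <= 0:
--         return []
--     text_len = len(text)
--     base_chunk_size = text_len // num_chunks
--     remainder = text_len % num_chunks
--     chunks = []
--     start_index = 0
--     for i in range(num_chunks):
--         chunk_size = base_chunk_size + (1 if i < remainder else 0)
--         end_index = start_index + chunk_size
--         # Ensure end_index does not exceed text length, especially with small texts/large num_chunks
--         end_index = min(end_index, text_len)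
--         chunks.append(text[start_index:end_index])
--         start_index = end_index
--         # Break if we've reached the end of the text prematurely
--         if start_index >= text_len:
--             break
--     # Filter out empty chunks just in case
--     return [chunk for chunk in chunks if chunk]
-- ===== SOURCE B (Python) =====
-- def get_text_chunks(text, num_chunks):
--     """Splits text into a specified number of roughly equal chunks."""
--     if not text or num_chunks <= 0:
--         return []
--     n = len(text)
--     base, rem = divmod(n, num_chunks)
--
--     def start(i):
--         return i * base + min(i, rem)
--
--     return [text[start(i):start(i + 1)] for i in range(min(num_chunks, n))]
-- ===== Notes on version B (the rewrite author's own statement) =====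
-- stated objective: simpler
-- what changed: Replaces A's sequential loop with a running start_index accumulator, an in-loop min clamp, an early break and a final empty-chunk filter by closed-form chunk boundaries start(i) = i*base + min(i, rem) mapped over range(min(num_chunks, len(text))), which yields exactly the nonempty chunks with no accumulator, no break and no filter.
import Mathlib
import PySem

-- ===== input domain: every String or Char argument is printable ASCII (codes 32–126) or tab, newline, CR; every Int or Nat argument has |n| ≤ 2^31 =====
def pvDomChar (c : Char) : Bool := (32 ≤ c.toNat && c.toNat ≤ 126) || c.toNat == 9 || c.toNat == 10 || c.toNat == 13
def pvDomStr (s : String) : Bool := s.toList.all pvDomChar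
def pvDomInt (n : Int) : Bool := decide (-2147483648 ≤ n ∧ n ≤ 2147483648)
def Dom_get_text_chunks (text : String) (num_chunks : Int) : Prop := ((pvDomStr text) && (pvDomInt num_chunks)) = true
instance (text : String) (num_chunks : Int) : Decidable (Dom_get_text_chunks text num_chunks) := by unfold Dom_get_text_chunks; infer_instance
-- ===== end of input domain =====

-- B replaces A's running start_index accumulator / early break / empty-chunk filter by
-- closed-form chunk boundaries start(i) = i*base + min(i, rem) mapped over range(min(num_chunks, len(text))) (objective: simpler).

-- ===== PORT A =====
-- A's for-loop: fuel = remaining range(num_chunks) iterations, i the loop index,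
-- start the running start_index, acc the chunks list; stops early when start_index >= text_len (the break)
def aChunkLoop (cs : List Char) (textLen base rem : Int) : Nat → Int → Int → List String → List String
  | 0, _, _, acc => acc
  | Nat.succ fuel, i, start, acc =>
    let chunkSize := base + (if i < rem then 1 else 0)
    let endIndex := min (start + chunkSize) textLen
    let acc' := acc ++ [String.ofList (PySem.List.slice cs (some start) (some endIndex))]
    if endIndex ≥ textLen then acc' else aChunkLoop cs textLen base rem fuel (i + 1) endIndex acc'

def get_text_chunks (text : String) (num_chunks : Int) : List String :=
  if text.toList = [] ∨ num_chunks ≤ 0 then []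
  else
    let cs := text.toList
    let textLen : Int := cs.length
    let base := PySem.Int.floordiv textLen num_chunks
    let rem := PySem.Int.mod textLen num_chunks
    let chunks := aChunkLoop cs textLen base rem num_chunks.toNat 0 0 []
    chunks.filter (fun c => !c.toList.isEmpty)

-- ===== PORT B =====
def get_text_chunks_alt (text : String) (num_chunks : Int) : List String :=
  if text.toList = [] ∨ num_chunks ≤ 0 then []
  else
    let cs := text.toList
    let n : Int := cs.length
    let base := PySem.Int.floordiv n num_chunks
    let rem := PySem.Int.mod n num_chunks
    let start := fun (i : Int) => i * base + min i rem
    (PySem.List.pyRange 0 (min num_chunks n) 1).map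
      (fun i => String.ofList (PySem.List.slice cs (some (start i)) (some (start (i + 1)))))

-- ===== PRECONDITION & SPEC =====
def Spec_get_text_chunks (text : String) (num_chunks : Int) (out : List String) : Prop := out = get_text_chunks_alt text num_chunks
instance (text : String) (num_chunks : Int) (out : List String) : Decidable (Spec_get_text_chunks text num_chunks out) := by unfold Spec_get_text_chunks; infer_instance

-- ===== CLAIM (what is proved, stated in full; the proofs are below) =====
def Claim_equal_get_text_chunks : Prop := ∀ (text : String) (num_chunks : Int), Dom_get_text_chunks text num_chunks → Spec_get_text_chunks text num_chunks (get_text_chunks text num_chunks)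

-- ===== LEMMAS AND PROOFS =====

-- the closed-form boundary start(i) advances by exactly A's chunk_size
lemma pv_S_step (base rem i : Int) :
    (i * base + min i rem) + (base + (if i < rem then 1 else 0)) =
      (i + 1) * base + min (i + 1) rem := by
  have h : (i + 1) * base = i * base + base := by ring
  rw [h]
  generalize i * base = p
  rcases lt_or_ge i rem with hlt | hge
  · rw [if_pos hlt]; omega
  · rw [if_neg (not_lt.mpr hge)]; omega

-- when the text is at least as long as the chunk count, the base size is positive
lemma pv_base_pos (k base rem n : Int) (hk : 0 < k) (hrk : rem < k)
    (heq : base * k + rem = n) (hkn : k ≤ n) : 1 ≤ base := by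
  by_contra h
  have h0 : base ≤ 0 := by omega
  have h1 : base * k ≤ 0 * k := mul_le_mul_of_nonneg_right h0 (le_of_lt hk)
  generalize base * k = q at heq h1
  omega

-- when the text is shorter than the chunk count, base = 0 and rem = n
lemma pv_base_zero (k base rem n : Int) (hk : 0 < k) (hb : 0 ≤ base) (hr : 0 ≤ rem)
    (heq : base * k + rem = n) (hnk : n < k) : base = 0 ∧ rem = n := by
  have h1 : base ≤ 0 := by
    by_contra h
    have h2 : 1 * k ≤ base * k := mul_le_mul_of_nonneg_right (by omega) (le_of_lt hk)
    generalize base * k = q at heq h2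
    omega
  have hb0 : base = 0 := le_antisymm h1 hb
  subst hb0
  simp at heq
  exact ⟨rfl, heq⟩

-- boundaries stay at most n for indices up to k
lemma pv_S_le (k base rem n j : Int) (hb : 0 ≤ base)
    (heq : base * k + rem = n) (hjk : j ≤ k) :
    j * base + min j rem ≤ n := by
  have h1 : j * base ≤ k * base := mul_le_mul_of_nonneg_right hjk hb
  have h2 : min j rem ≤ rem := min_le_right _ _
  nlinarith

-- strictly below n before index min k n
lemma pv_S_lt (k base rem n j : Int) (hk : 0 < k) (hb : 0 ≤ base) (hr : 0 ≤ rem) (hrk : rem < k)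
    (heq : base * k + rem = n) (hjm : j < min k n) :
    j * base + min j rem < n := by
  rcases le_or_gt k n with hkn | hnk
  · have hb1 : 1 ≤ base := pv_base_pos k base rem n hk hrk heq hkn
    have hjk : j < k := by omega
    have key : 1 * 1 ≤ (k - j) * base := by
      apply mul_le_mul (by omega) hb1 (by omega) (by omega)
    have hmin : min j rem ≤ rem := min_le_right _ _
    nlinarith
  · obtain ⟨hb0, hrn⟩ := pv_base_zero k base rem n hk hb hr heq hnk
    subst hb0 hrn
    simp
    omega

-- exactly n at (and past) index min k n
lemma pv_S_end (k base rem n j : Int) (hk : 0 < k) (hb : 0 ≤ base) (hr : 0 ≤ rem) (hrk : rem < k)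
    (heq : base * k + rem = n) (hjm : min k n ≤ j) (hjk : j ≤ k) :
    j * base + min j rem = n := by
  rcases le_or_gt k n with hkn | hnk
  · have hj : j = k := by omega
    subst hj
    rw [min_eq_right (le_of_lt hrk)]
    linarith
  · obtain ⟨hb0, hrn⟩ := pv_base_zero k base rem n hk hb hr heq hnk
    subst hb0 hrn
    simp
    omega

-- consecutive boundaries are strictly increasing before index min k n (chunks are nonempty)
lemma pv_S_strict (k base rem n j : Int) (hk : 0 < k) (hb : 0 ≤ base) (hr : 0 ≤ rem) (hrk : rem < k)
    (heq : base * k + rem = n) (hjm : j < min k n) :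
    j * base + min j rem < (j + 1) * base + min (j + 1) rem := by
  rw [← pv_S_step base rem j]
  rcases lt_or_ge j rem with h | h
  · rw [if_pos h]; omega
  · rw [if_neg (not_lt.mpr h)]
    rcases le_or_gt k n with hkn | hnk
    · have hb1 : 1 ≤ base := pv_base_pos k base rem n hk hrk heq hkn
      omega
    · obtain ⟨hb0, hrn⟩ := pv_base_zero k base rem n hk hb hr heq hnk
      exfalso
      omega

-- A's loop, started at boundary start(i), yields exactly B's remaining chunks
lemma pv_loop (cs : List Char) (k base rem : Int) (hk : 0 < k)
    (hb : 0 ≤ base) (hr : 0 ≤ rem) (hrk : rem < k)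
    (heq : base * k + rem = (cs.length : Int)) :
    ∀ (fuel : Nat) (i : Int) (acc : List String),
      (fuel : Int) + i = k → 0 ≤ i → i < min k (cs.length : Int) →
      aChunkLoop cs (cs.length : Int) base rem fuel i (i * base + min i rem) acc =
        acc ++ (PySem.List.pyRange i (min k (cs.length : Int)) 1).map
          (fun j => String.ofList (PySem.List.slice cs (some (j * base + min j rem))
                                                      (some ((j + 1) * base + min (j + 1) rem)))) := by
  intro fuel
  induction fuel with
  | zero =>
    intro i acc hf hi him
    exfalso
    have : i < k := by omega
    omega
  | succ f ih =>
    intro i acc hf hi him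
    have hik : i < k := by omega
    have hstep : (i * base + min i rem) + (base + (if i < rem then 1 else 0)) =
        (i + 1) * base + min (i + 1) rem := pv_S_step base rem i
    have hle : (i + 1) * base + min (i + 1) rem ≤ (cs.length : Int) :=
      pv_S_le k base rem _ (i + 1) hb heq (by omega)
    have hend : min ((i * base + min i rem) + (base + (if i < rem then 1 else 0)))
        (cs.length : Int) = (i + 1) * base + min (i + 1) rem := by
      rw [hstep]; exact min_eq_left hle
    show (if min ((i * base + min i rem) + (base + (if i < rem then 1 else 0))) (cs.length : Int) ≥ (cs.length : Int)
          then acc ++ [String.ofList (PySem.List.slice cs (some (i * base + min i rem))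
                 (some (min ((i * base + min i rem) + (base + (if i < rem then 1 else 0))) (cs.length : Int))))]
          else aChunkLoop cs (cs.length : Int) base rem f (i + 1)
                 (min ((i * base + min i rem) + (base + (if i < rem then 1 else 0))) (cs.length : Int))
                 (acc ++ [String.ofList (PySem.List.slice cs (some (i * base + min i rem))
                   (some (min ((i * base + min i rem) + (base + (if i < rem then 1 else 0))) (cs.length : Int))))])) = _
    rw [hend]
    rcases lt_or_ge (i + 1) (min k (cs.length : Int)) with hlt | hge
    · -- no break: recurse and peel one element off the range
      have hcont : ¬ ((i + 1) * base + min (i + 1) rem ≥ (cs.length : Int)) := by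
        have := pv_S_lt k base rem (cs.length : Int) (i + 1) hk hb hr hrk heq hlt
        omega
      rw [if_neg hcont, ih (i + 1) _ (by omega) (by omega) hlt,
          PySem.List.pyRange_one_cons him]
      simp
    · -- break: this was the last chunk
      have hbrk : (i + 1) * base + min (i + 1) rem ≥ (cs.length : Int) := by
        have := pv_S_end k base rem (cs.length : Int) (i + 1) hk hb hr hrk heq hge (by omega)
        omega
      rw [if_pos hbrk]
      have hm : min k (cs.length : Int) = i + 1 := le_antisymm hge (by omega)
      rw [hm, PySem.List.pyRange_one_cons (by omega : i < i + 1)]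
      simp

-- a slice with in-range strictly increasing bounds is nonempty
lemma pv_slice_ne_nil (cs : List Char) (a b : Int) (ha : 0 ≤ a) (hab : a < b)
    (hbn : b ≤ (cs.length : Int)) :
    PySem.List.slice cs (some a) (some b) ≠ [] := by
  have ha' : a = ((a.toNat : Nat) : Int) := (Int.toNat_of_nonneg ha).symm
  have hb' : b = ((b.toNat : Nat) : Int) := (Int.toNat_of_nonneg (by omega)).symm
  rw [ha', hb', PySem.List.slice_natCast]
  intro hnil
  have := congrArg List.length hnil
  simp [List.length_take, List.length_drop] at this
  omega

-- ===== VERDICT (by name: the statement is the Claim_ definition above) =====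
theorem get_text_chunks_spec : Claim_equal_get_text_chunks := by
  intro text k _hdom
  unfold Spec_get_text_chunks get_text_chunks get_text_chunks_alt
  by_cases hg : text.toList = [] ∨ k ≤ 0
  · rw [if_pos hg, if_pos hg]
  · rw [if_neg hg, if_neg hg]
    have hne : text.toList ≠ [] := fun h => hg (Or.inl h)
    have hk : 0 < k := by
      rcases lt_or_ge 0 k with h | h
      · exact h
      · exact absurd (Or.inr (by omega)) hg
    show (aChunkLoop text.toList (text.toList.length : Int)
          (PySem.Int.floordiv (text.toList.length : Int) k)
          (PySem.Int.mod (text.toList.length : Int) k) k.toNat 0 0 []).filter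
            (fun c => !c.toList.isEmpty)
        = (PySem.List.pyRange 0 (min k (text.toList.length : Int)) 1).map (fun i =>
            String.ofList (PySem.List.slice text.toList
              (some (i * PySem.Int.floordiv (text.toList.length : Int) k +
                     min i (PySem.Int.mod (text.toList.length : Int) k)))
              (some ((i + 1) * PySem.Int.floordiv (text.toList.length : Int) k +
                     min (i + 1) (PySem.Int.mod (text.toList.length : Int) k)))))
    set cs := text.toList with hcs
    set n : Int := (cs.length : Int) with hnn
    set base := PySem.Int.floordiv n k with hbase
    set rem := PySem.Int.mod n k with hrem
    have hn : 0 < n := by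
      rw [hnn]
      exact_mod_cast List.length_pos_of_ne_nil hne
    have hfd : base = n / k := PySem.Int.floordiv_eq_ediv_of_pos hk
    have hmd : rem = n % k := PySem.Int.mod_eq_emod_of_pos hk
    have hb : 0 ≤ base := by rw [hfd]; exact Int.ediv_nonneg (le_of_lt hn) (le_of_lt hk)
    have hr : 0 ≤ rem := by rw [hmd]; exact Int.emod_nonneg n (ne_of_gt hk)
    have hrk : rem < k := by rw [hmd]; exact Int.emod_lt_of_pos n hk
    have heq : base * k + rem = n := by
      rw [hfd, hmd, mul_comm]; exact Int.mul_ediv_add_emod n k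
    have hloop := pv_loop cs k base rem hk hb hr hrk (hnn ▸ heq)
      k.toNat 0 [] (by simp [Int.toNat_of_nonneg (le_of_lt hk)]) (le_refl 0)
      (hnn ▸ lt_min hk hn)
    have hS0 : (0 : Int) * base + min 0 rem = 0 := by simp [min_eq_left hr]
    rw [hS0] at hloop
    rw [← hnn] at hloop
    rw [hloop, List.nil_append]
    apply List.filter_eq_self.mpr
    intro s hs
    obtain ⟨j, hj, rfl⟩ := List.mem_map.mp hs
    obtain ⟨hj0, hjm⟩ := PySem.List.mem_pyRange_one.mp hj
    have hlt := pv_S_strict k base rem n j hk hb hr hrk heq hjm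
    have hnn0 : 0 ≤ j * base + min j rem := by
      have h1 : 0 ≤ j * base := mul_nonneg hj0 hb
      have h2 : 0 ≤ min j rem := le_min hj0 hr
      omega
    have hle : (j + 1) * base + min (j + 1) rem ≤ n :=
      pv_S_le k base rem n (j + 1) hb heq (by omega)
    simpa using pv_slice_ne_nil cs _ _ hnn0 hlt (hnn ▸ hle)
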